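-- pv_equiv track=rewrite | github.com/AndreyLizarazo/Tseitin | pruebas3.py | formaClausal
-- ===== SOURCE A (Python) =====
-- def Clausula(C):
--     L=[]
--     while len(C)>0:
--         s=C[0]
--         if s == "O":
--             C=C[1:]
--         elif s== "-":
--             literal = s + C[1]
--             L.append(literal)
--             C = C[2:]
--         else:
--             L.append(s)
--             C = C[1:]
--
--     return L
--
-- def formaClausal(A):
--     l = []
--     i = 0
--     while len(A)> 0:
--         if i >= len(A):
--             l.append(Clausula(A))
--             A = []
--         else:
--             if A[i] == 'Y':
--                 l.append(Clausula(A[:i]))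
--                 A = A[i+1:]
--                 i = 0
--             else:
--                 i+=1
--     return l
-- ===== SOURCE B (Python) =====
-- def formaClausal(A):
--     # single linear pass: build clauses on the fly; '-' sets a pending flag that
--     # merges with the next character; 'Y' closes the current clause; 'O' is skipped
--     result = []
--     clause = []
--     pending = False
--     for c in A:
--         if pending:
--             clause.append('-' + c)
--             pending = False
--         elif c == 'Y':
--             result.append(clause)
--             clause = []
--         elif c == '-':
--             pending = True
--         elif c != 'O':
--             clause.append(c)
--     if A and not A.endswith('Y'):
--         result.append(clause)
--     return result
-- ===== Notes on version B (the rewrite author's own statement) =====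
-- stated objective: faster
-- what changed: B makes a single linear pass over the string with a pending-'-' flag and an open current clause, instead of A's outer loop that rescans for 'Y' and re-slices the remaining string and A's inner Clausula that repeatedly slices its argument.
-- outside the precondition, e.g. on formaClausal('a-'): A raises IndexError, B returns [['a']]; on formaClausal('x-Yz'): A raises IndexError, B returns [['x', '-Y', 'z']]
import Mathlib
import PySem

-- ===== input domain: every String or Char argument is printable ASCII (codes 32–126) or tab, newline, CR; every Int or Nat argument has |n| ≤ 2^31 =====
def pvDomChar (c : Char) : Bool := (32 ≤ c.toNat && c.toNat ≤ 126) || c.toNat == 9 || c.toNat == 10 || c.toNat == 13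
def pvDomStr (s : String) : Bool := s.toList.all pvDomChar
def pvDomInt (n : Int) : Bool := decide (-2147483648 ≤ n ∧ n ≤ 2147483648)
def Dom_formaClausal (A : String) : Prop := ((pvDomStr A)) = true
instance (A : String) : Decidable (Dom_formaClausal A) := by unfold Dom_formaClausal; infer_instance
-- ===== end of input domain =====

-- B replaces A's rescan-and-slice loop by one linear pass with a pending-'-' flag (objective: faster).

-- ===== PORT A =====
-- Clausula(C) with accumulator L; 'none' = IndexError ('-' as last character makes C[1] raise)
def clausulaA : List Char → List String → Option (List String)
  | [], L => some L
  | s :: rest, L =>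
    if s = 'O' then clausulaA rest L
    else if s = '-' then
      match rest with
      | [] => none                                   -- C[1] raises IndexError
      | t :: rest2 => clausulaA rest2 (L ++ [String.ofList ['-', t]])
    else clausulaA rest (L ++ [String.ofList [s]])

-- the while-loop of formaClausal: state (A, i, l); 'none' propagates Clausula's IndexError
def loopA (C : List Char) (i : Nat) (l : List (List String)) : Option (List (List String)) :=
  if 0 < C.length then
    if i ≥ C.length then
      match clausulaA C [] with
      | none => none
      | some c => loopA [] i (l ++ [c])
    else if C.getD i ' ' = 'Y' then
      match clausulaA (C.take i) [] with
      | none => none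
      | some c => loopA (C.drop (i + 1)) 0 (l ++ [c])
    else loopA C (i + 1) l
  else some l
termination_by 2 * C.length + (C.length + 1 - i)
decreasing_by
  · simp; omega
  · simp; omega
  · simp; omega

def formaClausal (A : String) : List (List String) :=
  (loopA A.toList 0 []).getD []     -- 'none' (IndexError) is excluded by Pre_formaClausal

-- ===== PORT B =====
-- one step of Source B's for-loop over the characters; state (result, clause, pending)
def stepB : (List (List String) × List String × Bool) → Char → (List (List String) × List String × Bool)
  | (res, clause, pending), c =>
    if pending then (res, clause ++ [String.ofList ['-', c]], false)
    else if c = 'Y' then (res ++ [clause], [], false)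
    else if c = '-' then (res, clause, true)
    else if c = 'O' then (res, clause, false)
    else (res, clause ++ [String.ofList [c]], false)

-- fold, then Source B's trailing 'if A and not A.endswith("Y")' (endswith of one char = getLast?)
def runB (l : List Char) (res : List (List String)) : List (List String) :=
  let st := l.foldl stepB (res, [], false)
  if l ≠ [] ∧ l.getLast? ≠ some 'Y' then st.1 ++ [st.2.1] else st.1

def formaClausal_alt (A : String) : List (List String) := runB A.toList []

-- ===== PRECONDITION & SPEC =====
def trailingDashes (l : List Char) : Nat := (l.reverse.takeWhile (· == '-')).length

-- Pre_ excludes exactly the inputs on which A raises IndexError: a 'Y'-delimited segment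
-- whose trailing run of '-' has odd length leaves a lone '-' for Clausula, and C[1] raises.
def Pre_formaClausal (A : String) : Prop :=
  ∀ seg ∈ A.toList.splitOn 'Y', trailingDashes seg % 2 = 0
instance (A : String) : Decidable (Pre_formaClausal A) := by unfold Pre_formaClausal; infer_instance

def pvWitness_formaClausal : String := "-pOqY--r"

def Spec_formaClausal (A : String) (out : List (List String)) : Prop := out = formaClausal_alt A
instance (A : String) (out : List (List String)) : Decidable (Spec_formaClausal A out) := by unfold Spec_formaClausal; infer_instance

-- ===== CLAIM (what is proved, stated in full; the proofs are below) =====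
def Claim_equal_formaClausal : Prop := ∀ (A : String), Dom_formaClausal A → Pre_formaClausal A → Spec_formaClausal A (formaClausal A)

-- ===== LEMMAS AND PROOFS =====

-- Clausula's accumulator only prepends: factor it out
theorem clausulaA_acc : ∀ (n : Nat) (seg : List Char), seg.length ≤ n →
    ∀ L, clausulaA seg L = (clausulaA seg []).map (L ++ ·) := by
  intro n
  induction n with
  | zero =>
    intro seg hlen L
    have : seg = [] := by cases seg <;> simp_all
    subst this; simp [clausulaA]
  | succ n ih =>
    intro seg hlen L
    match seg with
    | [] => simp [clausulaA]
    | [s] =>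
      rw [clausulaA.eq_2, clausulaA.eq_2]
      by_cases hO : s = 'O'
      · simp [hO, clausulaA]
      · by_cases hD : s = '-'
        · simp [hD]
        · simp [hO, hD, clausulaA]
    | s :: t :: rest2 =>
      rw [clausulaA.eq_3, clausulaA.eq_3]
      by_cases hO : s = 'O'
      · simp only [if_pos hO]
        rw [ih (t :: rest2) (by simp at hlen ⊢; omega) L]
      · by_cases hD : s = '-'
        · simp only [if_neg hO, if_pos hD]
          rw [ih rest2 (by simp at hlen; omega) ([] ++ [String.ofList ['-', t]]),
              ih rest2 (by simp at hlen; omega) (L ++ [String.ofList ['-', t]])]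
          cases clausulaA rest2 [] <;> simp
        · simp only [if_neg hO, if_neg hD]
          rw [ih (t :: rest2) (by simp at hlen ⊢; omega) ([] ++ [String.ofList [s]]),
              ih (t :: rest2) (by simp at hlen ⊢; omega) (L ++ [String.ofList [s]])]
          cases clausulaA (t :: rest2) [] <;> simp

-- a successful Clausula run over a 'Y'-free segment = B's fold with pending initially false
theorem clause_fold : ∀ (n : Nat) (seg : List Char), seg.length ≤ n → 'Y' ∉ seg →
    ∀ r, clausulaA seg [] = some r →
    ∀ res clause, seg.foldl stepB (res, clause, false) = (res, clause ++ r, false) := by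
  intro n
  induction n with
  | zero =>
    intro seg hlen _ r hr res clause
    have : seg = [] := by cases seg <;> simp_all
    subst this
    simp [clausulaA] at hr
    simp [hr.symm]
  | succ n ih =>
    intro seg hlen hY r hr res clause
    match seg with
    | [] =>
      simp [clausulaA] at hr
      simp [hr.symm]
    | [s] =>
      rw [clausulaA.eq_2] at hr
      have hsY : s ≠ 'Y' := by simp at hY; exact fun h => hY h.symm
      by_cases hO : s = 'O'
      · simp [clausulaA, hO] at hr
        simp [stepB, hO, hr.symm]
      · by_cases hD : s = '-'
        · simp [hD] at hr
        · simp [clausulaA, hO, hD] at hr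
          simp [stepB, hO, hD, hsY, hr.symm]
    | s :: t :: rest2 =>
      rw [clausulaA.eq_3] at hr
      have hsY : s ≠ 'Y' := by simp at hY; exact fun h => hY.1 h.symm
      by_cases hO : s = 'O'
      · rw [if_pos hO] at hr
        have := ih (t :: rest2) (by simp at hlen ⊢; omega) (by simp at hY ⊢; exact ⟨hY.2.1, hY.2.2⟩) r hr res clause
        simpa [stepB, hO, hsY] using this
      · by_cases hD : s = '-'
        · rw [if_neg hO, if_pos hD] at hr
          rw [clausulaA_acc rest2.length rest2 le_rfl] at hr
          cases h2 : clausulaA rest2 [] with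
          | none => rw [h2] at hr; simp at hr
          | some r' =>
            rw [h2] at hr; simp at hr
            have := ih rest2 (by simp at hlen; omega) (by simp at hY; exact hY.2.2) r' h2 res (clause ++ [String.ofList ['-', t]])
            simp only [List.foldl_cons]
            rw [show stepB (res, clause, false) s = (res, clause, true) by simp [stepB, hD]]
            rw [show stepB (res, clause, true) t = (res, clause ++ [String.ofList ['-', t]], false) by simp [stepB]]
            rw [this, ← hr]
            simp
        · rw [if_neg hO, if_neg hD] at hr
          rw [clausulaA_acc (t :: rest2).length (t :: rest2) le_rfl] at hr
          cases h2 : clausulaA (t :: rest2) [] with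
          | none => rw [h2] at hr; simp at hr
          | some r' =>
            rw [h2] at hr; simp at hr
            have := ih (t :: rest2) (by simp at hlen ⊢; omega) (by simp at hY ⊢; exact ⟨hY.2.1, hY.2.2⟩) r' h2 res (clause ++ [String.ofList [s]])
            rw [show (s :: t :: rest2).foldl stepB (res, clause, false)
                  = (t :: rest2).foldl stepB (stepB (res, clause, false) s) from rfl]
            rw [show stepB (res, clause, false) s = (res, clause ++ [String.ofList [s]], false) by simp [stepB, hsY, hD, hO]]
            rw [this, ← hr]
            simp

theorem td_eq_len_iff (l : List Char) : trailingDashes l = l.length ↔ ∀ x ∈ l, x = '-' := by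
  unfold trailingDashes
  constructor
  · intro h x hx
    have hpre := List.takeWhile_prefix (l := l.reverse) (p := (· == '-'))
    have heq : l.reverse.takeWhile (· == '-') = l.reverse :=
      hpre.eq_of_length (by simpa using h)
    have hx' : x ∈ l.reverse := by simpa using hx
    have := List.mem_takeWhile_imp (heq ▸ hx')
    simpa using this
  · intro h
    have : l.reverse.takeWhile (· == '-') = l.reverse := by
      rw [List.takeWhile_eq_self_iff]
      intro x hx; simp at hx ⊢; exact h x hx
    simp [this]

theorem td_cons_ne (c : Char) (rest : List Char) (hc : c ≠ '-') :
    trailingDashes (c :: rest) = trailingDashes rest := by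
  unfold trailingDashes
  rw [List.reverse_cons, List.takeWhile_append]
  split_ifs with h
  · have : rest.reverse.takeWhile (· == '-') = rest.reverse :=
      (List.takeWhile_prefix _).eq_of_length h
    have h2 : (c == '-') = false := by simp [hc]
    simp [this, List.takeWhile, h2]
  · rfl

theorem td_cons_dash (rest : List Char) :
    trailingDashes ('-' :: rest) =
      if trailingDashes rest = rest.length then rest.length + 1 else trailingDashes rest := by
  conv_lhs => unfold trailingDashes
  rw [List.reverse_cons, List.takeWhile_append]
  have hlen : (rest.reverse.takeWhile (· == '-')).length = trailingDashes rest := rfl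
  split_ifs with h1 h2 h2
  · simp
  · exfalso; apply h2; rw [← hlen]; simpa using h1
  · exfalso; apply h1; rw [hlen]; simpa using h2
  · exact hlen

-- consuming '-' and the paired character keeps the parity of the trailing dash run
theorem td_dash_parity (t : Char) (rest2 : List Char) :
    trailingDashes ('-' :: t :: rest2) % 2 = trailingDashes rest2 % 2 := by
  rw [td_cons_dash]
  split_ifs with h
  · have hall := (td_eq_len_iff _).1 h
    have hr2 : trailingDashes rest2 = rest2.length :=
      (td_eq_len_iff _).2 (fun x hx => hall x (List.mem_cons_of_mem _ hx))
    simp [hr2]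
    omega
  · by_cases ht : t = '-'
    · subst ht
      rw [td_cons_dash]
      split_ifs with h2
      · exfalso; apply h
        rw [td_eq_len_iff]
        intro x hx
        rcases List.mem_cons.1 hx with h' | h'
        · exact h'
        · exact (td_eq_len_iff _).1 h2 x h'
      · rfl
    · rw [td_cons_ne t rest2 ht]

-- an even trailing dash run means Clausula returns (never hits the lone final '-')
theorem even_some : ∀ (n : Nat) (seg : List Char), seg.length ≤ n →
    trailingDashes seg % 2 = 0 → ∃ r, clausulaA seg [] = some r := by
  intro n
  induction n with
  | zero =>
    intro seg hlen _
    have : seg = [] := by cases seg <;> simp_all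
    subst this; exact ⟨[], rfl⟩
  | succ n ih =>
    intro seg hlen hev
    match seg with
    | [] => exact ⟨[], rfl⟩
    | [s] =>
      rw [clausulaA.eq_2]
      by_cases hD : s = '-'
      · exfalso; subst hD
        have : trailingDashes ['-'] = 1 := by decide
        omega
      · by_cases hO : s = 'O'
        · exact ⟨[], by simp [hO, clausulaA]⟩
        · exact ⟨[String.ofList [s]], by simp [hO, hD, clausulaA]⟩
    | s :: t :: rest2 =>
      rw [clausulaA.eq_3]
      by_cases hO : s = 'O'
      · rw [if_pos hO]
        apply ih (t :: rest2) (by simp at hlen ⊢; omega)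
        rw [← td_cons_ne s (t :: rest2) (by subst hO; decide)]
        exact hev
      · by_cases hD : s = '-'
        · rw [if_neg hO, if_pos hD]
          have hev2 : trailingDashes rest2 % 2 = 0 := by
            rw [← td_dash_parity t rest2]; rw [← hD]; exact hev
          obtain ⟨r', hr'⟩ := ih rest2 (by simp at hlen; omega) hev2
          refine ⟨String.ofList ['-', t] :: r', ?_⟩
          rw [clausulaA_acc rest2.length rest2 le_rfl, hr']
          simp
        · rw [if_neg hO, if_neg hD]
          have hev2 : trailingDashes (t :: rest2) % 2 = 0 := by
            rw [← td_cons_ne s (t :: rest2) hD]; exact hev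
          obtain ⟨r', hr'⟩ := ih (t :: rest2) (by simp at hlen ⊢; omega) hev2
          refine ⟨String.ofList [s] :: r', ?_⟩
          rw [clausulaA_acc (t :: rest2).length (t :: rest2) le_rfl, hr']
          simp

theorem splitOn_no_sep (l : List Char) (h : 'Y' ∉ l) : l.splitOn 'Y' = [l] := by
  induction l with
  | nil => rfl
  | cons c tl ih =>
    have hc : (c == 'Y') = false := by simp at h ⊢; exact fun he => h.1 he.symm
    show List.splitOnP (· == 'Y') (c :: tl) = _
    rw [List.splitOnP_cons, hc]
    have := ih (fun hm => h (List.mem_cons_of_mem _ hm))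
    rw [show List.splitOnP (· == 'Y') tl = tl.splitOn 'Y' from rfl, this]
    rfl

theorem splitOn_first (l₁ l₂ : List Char) (h : 'Y' ∉ l₁) :
    (l₁ ++ 'Y' :: l₂).splitOn 'Y' = l₁ :: l₂.splitOn 'Y' := by
  induction l₁ with
  | nil =>
    show List.splitOnP (· == 'Y') ('Y' :: l₂) = _
    rw [List.splitOnP_cons]
    simp
    rfl
  | cons c tl ih =>
    have hc : (c == 'Y') = false := by simp at h ⊢; exact fun he => h.1 he.symm
    show List.splitOnP (· == 'Y') (c :: (tl ++ 'Y' :: l₂)) = _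
    rw [List.splitOnP_cons, hc]
    simp only [Bool.false_eq_true, if_false]
    rw [show List.splitOnP (· == 'Y') (tl ++ 'Y' :: l₂) = (tl ++ 'Y' :: l₂).splitOn 'Y' from rfl,
        ih (fun hm => h (List.mem_cons_of_mem _ hm))]
    rfl

-- the index i just walks forward over non-'Y' characters
theorem loop_skip : ∀ (k : Nat), ∀ (C : List Char) (i : Nat) (res : List (List String)),
    i + k ≤ C.length → (∀ j, i ≤ j → j < i + k → C.getD j ' ' ≠ 'Y') →
    loopA C i res = loopA C (i + k) res := by
  intro k
  induction k with
  | zero => intro C i res _ _; rfl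
  | succ k ih =>
    intro C i res hlen hnoY
    have h0 : 0 < C.length := by omega
    have hi : ¬ i ≥ C.length := by omega
    rw [loopA, if_pos h0, if_neg hi, if_neg (hnoY i le_rfl (by omega))]
    rw [ih C (i + 1) res (by omega) (fun j h1 h2 => hnoY j (by omega) (by omega))]
    congr 1
    omega

theorem head_dropWhile_false (p : Char → Bool) :
    ∀ (l : List Char) (c : Char) (t : List Char), l.dropWhile p = c :: t → p c = false := by
  intro l
  induction l with
  | nil => intro c t h; simp [List.dropWhile] at h
  | cons a tl ih =>
    intro c t h
    rw [List.dropWhile_cons] at h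
    split_ifs at h with hp
    · exact ih c t h
    · cases h; simpa using hp

-- after consuming the clause before the first 'Y' (or the whole 'Y'-free rest),
-- both programs agree; strong induction on the remaining length
theorem main_lemma : ∀ (n : Nat) (C : List Char), C.length ≤ n →
    (∀ seg ∈ C.splitOn 'Y', trailingDashes seg % 2 = 0) →
    ∀ res, loopA C 0 res = some (runB C res) := by
  intro n
  induction n with
  | zero =>
    intro C hlen _ res
    have : C = [] := by cases C <;> simp_all
    subst this
    rw [loopA]; simp [runB]
  | succ n ih =>
    intro C hlen hpre res
    by_cases hC : C = []
    · subst hC; rw [loopA]; simp [runB]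
    · by_cases hY : 'Y' ∈ C
      · -- split C at the first 'Y'
        set p : Char → Bool := fun c => !(c == 'Y') with hp
        set l₁ := C.takeWhile p with hl₁
        have hd : C.dropWhile p ≠ [] := by
          intro h
          rw [List.dropWhile_eq_nil_iff] at h
          have := h 'Y' hY
          simp [hp] at this
        obtain ⟨c₀, l₂, hdeq⟩ : ∃ c₀ l₂, C.dropWhile p = c₀ :: l₂ := by
          cases hcase : C.dropWhile p with
          | nil => exact absurd hcase hd
          | cons a b => exact ⟨a, b, rfl⟩
        have hc₀ : c₀ = 'Y' := by
          have := head_dropWhile_false p C c₀ l₂ hdeq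
          simpa [hp] using this
        subst hc₀
        have hCeq : C = l₁ ++ 'Y' :: l₂ := by
          rw [hl₁, ← hdeq, List.takeWhile_append_dropWhile]
        have hYl₁ : 'Y' ∉ l₁ := by
          intro hm
          have := List.mem_takeWhile_imp (hl₁ ▸ hm)
          simp [hp] at this
        have hsp : C.splitOn 'Y' = l₁ :: l₂.splitOn 'Y' := by
          rw [hCeq]; exact splitOn_first l₁ l₂ hYl₁
        have htd1 : trailingDashes l₁ % 2 = 0 := hpre l₁ (by rw [hsp]; exact List.mem_cons_self)
        have hpre2 : ∀ seg ∈ l₂.splitOn 'Y', trailingDashes seg % 2 = 0 := by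
          intro seg hm; exact hpre seg (by rw [hsp]; exact List.mem_cons_of_mem _ hm)
        obtain ⟨c, hc⟩ := even_some l₁.length l₁ le_rfl htd1
        have hlenC : C.length = l₁.length + 1 + l₂.length := by rw [hCeq]; simp; omega
        -- walk i up to the first 'Y'
        have hskip : loopA C 0 res = loopA C l₁.length res := by
          have := loop_skip l₁.length C 0 res (by omega)
            (fun j _ hj => by
              rw [hCeq, List.getD_append _ _ _ _ (by simpa using hj)]
              intro he
              apply hYl₁
              rw [← he]
              rw [List.getD_eq_getElem l₁ ' ' (by simpa using hj)]
              exact List.getElem_mem _)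
          simpa using this
        have htake : C.take l₁.length = l₁ := by rw [hCeq]; exact List.take_left
        have hgetD : C.getD l₁.length ' ' = 'Y' := by
          rw [hCeq, List.getD_append_right _ _ _ _ le_rfl]
          simp
        have hdrop : C.drop (l₁.length + 1) = l₂ := by
          rw [hCeq, show l₁ ++ 'Y' :: l₂ = (l₁ ++ ['Y']) ++ l₂ by simp,
              show l₁.length + 1 = (l₁ ++ ['Y']).length by simp, List.drop_left]
        rw [hskip, loopA, if_pos (by omega : 0 < C.length),
            if_neg (by omega : ¬ l₁.length ≥ C.length), if_pos hgetD, htake, hc, hdrop]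
        show loopA l₂ 0 (res ++ [c]) = some (runB C res)
        rw [ih l₂ (by omega) hpre2 (res ++ [c])]
        -- now show runB C res = runB l₂ (res ++ [c])
        have hfold : C.foldl stepB (res, [], false) = l₂.foldl stepB (res ++ [c], [], false) := by
          rw [hCeq, List.foldl_append]
          rw [clause_fold l₁.length l₁ le_rfl hYl₁ c hc res []]
          simp [stepB]
        cases l₂ with
        | nil =>
          have hlast : C.getLast? = some 'Y' := by
            rw [hCeq]; simp
          simp only [runB, hfold, hlast]
          simp
        | cons x xs =>
          have hlast : C.getLast? = (x :: xs).getLast? := by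
            rw [hCeq, show l₁ ++ 'Y' :: x :: xs = (l₁ ++ ['Y']) ++ x :: xs by simp,
                List.getLast?_append]
            cases hg : (x :: xs).getLast? with
            | none => simp at hg
            | some v => simp
          simp only [runB, hfold, hlast]
          simp [hC]
      · -- no 'Y': the whole of C is one clause
        have hsp := splitOn_no_sep C hY
        have htd : trailingDashes C % 2 = 0 := hpre C (by rw [hsp]; exact List.mem_cons_self)
        obtain ⟨r, hr⟩ := even_some C.length C le_rfl htd
        have hskip : loopA C 0 res = loopA C C.length res := by
          have := loop_skip C.length C 0 res (by omega)
            (fun j _ hj => by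
              intro he
              apply hY
              rw [← he, List.getD_eq_getElem C ' ' (by simpa using hj)]
              exact List.getElem_mem _)
          simpa using this
        rw [hskip, loopA, if_pos (by simpa [List.length_pos_iff] using hC), if_pos le_rfl, hr]
        show loopA [] C.length (res ++ [r]) = some (runB C res)
        rw [loopA]
        simp only [List.length_nil, lt_irrefl, if_false]
        have hlast : C.getLast? ≠ some 'Y' := by
          cases hg : C.getLast? with
          | none => simp
          | some v =>
            have : v ∈ C := List.mem_of_getLast? hg
            intro he
            apply hY
            have : v = 'Y' := by simpa using he
            exact this ▸ ‹v ∈ C›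
        simp only [runB]
        rw [clause_fold C.length C le_rfl hY r hr res []]
        simp [hC, hlast]

-- ===== VERDICT (by name: the statement is the Claim_ definition above) =====
theorem formaClausal_spec : Claim_equal_formaClausal := by
  intro A _ hPre
  unfold Spec_formaClausal formaClausal formaClausal_alt
  rw [main_lemma A.toList.length A.toList le_rfl hPre []]
  rfl
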